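-- pv_equiv track=rewrite | github.com/AdxbA9/Faculty-Onboarding-Chatbot | MiniV5/MCBV9.py | deduplicate_by_text
-- ===== SOURCE A (Python) =====
-- from typing import Dict, List, Tuple, Optional
--
-- def deduplicate_by_text(items: List[Dict]) -> List[Dict]:
--     seen = set()
--     out = []
--     for item in items:
--         text = item["chunk"]
--         if text not in seen:
--             seen.add(text)
--             out.append(item)
--     return out
-- ===== SOURCE B (Python) =====
-- def deduplicate_by_text(items):
--     out = []
--     rest = list(items)
--     while rest:
--         head = rest[0]
--         out.append(head)
--         key = head["chunk"]
--         rest = [x for x in rest[1:] if x["chunk"] != key]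
--     return out
-- ===== Notes on version B (the rewrite author's own statement) =====
-- stated objective: alternative
-- what changed: Replaces the seen-set single pass with a nub-style repeated-filter algorithm: take the head, emit it, and filter every item with the same chunk text out of the remainder, so no seen structure is kept at all.
import Mathlib
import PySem

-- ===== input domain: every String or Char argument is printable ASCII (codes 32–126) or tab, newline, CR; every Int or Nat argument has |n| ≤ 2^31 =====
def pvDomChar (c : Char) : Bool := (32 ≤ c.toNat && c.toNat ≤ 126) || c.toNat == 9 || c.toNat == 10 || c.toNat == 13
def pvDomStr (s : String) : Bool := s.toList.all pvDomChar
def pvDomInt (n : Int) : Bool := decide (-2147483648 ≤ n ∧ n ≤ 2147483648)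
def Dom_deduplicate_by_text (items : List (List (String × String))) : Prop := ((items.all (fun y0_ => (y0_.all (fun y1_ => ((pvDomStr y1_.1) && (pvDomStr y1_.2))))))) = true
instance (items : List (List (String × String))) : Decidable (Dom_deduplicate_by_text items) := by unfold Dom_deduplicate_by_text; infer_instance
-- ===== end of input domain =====

-- B replaces A's seen-set single pass with a nub-style repeated-filter algorithm
-- (take the head, emit it, filter its chunk text out of the rest); alternative, O(n^2).


-- ===== PORT A =====
-- item["chunk"]: KeyError (get? = none) is excluded by Pre_; the .getD "" branch is unreachable there.
def pvChunkOf (item : List (String × String)) : String :=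
  ((PySem.Dict.mk item).get? "chunk").getD ""

def deduplicate_by_text (items : List (List (String × String))) : List (List (String × String)) :=
  (items.foldl
    (fun (st : PySem.Set String × List (List (String × String))) item =>
      let text := pvChunkOf item
      if PySem.Set.contains st.1 text then st
      else (PySem.Set.add st.1 text, st.2 ++ [item]))
    (PySem.Set.empty, [])).2

-- ===== PORT B =====
-- 'while rest:' with 'rest = [x for x in rest[1:] if x["chunk"] != key]' becomes
-- structural recursion on the (strictly shrinking) filtered remainder.
def deduplicate_by_text_alt (items : List (List (String × String))) : List (List (String × String)) :=
  match items with
  | [] => []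
  | head :: rest =>
      head :: deduplicate_by_text_alt (rest.filter (fun x => pvChunkOf x ≠ pvChunkOf head))
termination_by items.length
decreasing_by
  simp
  exact le_trans (List.length_filter_le _ _) (by simp)

-- ===== PRECONDITION & SPEC =====
-- Pre_: every item actually has the "chunk" key — Python A raises KeyError otherwise.
def Pre_deduplicate_by_text (items : List (List (String × String))) : Prop :=
  ∀ item ∈ items, (PySem.Dict.mk item).contains "chunk" = true
instance (items : List (List (String × String))) : Decidable (Pre_deduplicate_by_text items) := by unfold Pre_deduplicate_by_text; infer_instance
def pvWitness_deduplicate_by_text : (List (List (String × String))) :=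
  [[("chunk", "hello"), ("id", "1")], [("chunk", "hello"), ("id", "2")], [("chunk", "bye")]]

def Spec_deduplicate_by_text (items : List (List (String × String))) (out : List (List (String × String))) : Prop := out = deduplicate_by_text_alt items
instance (items : List (List (String × String))) (out : List (List (String × String))) : Decidable (Spec_deduplicate_by_text items out) := by unfold Spec_deduplicate_by_text; infer_instance

-- ===== CLAIM (what is proved, stated in full; the proofs are below) =====
def Claim_equal_deduplicate_by_text : Prop := ∀ (items : List (List (String × String))), Dom_deduplicate_by_text items → Pre_deduplicate_by_text items → Spec_deduplicate_by_text items (deduplicate_by_text items)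

-- ===== LEMMAS AND PROOFS =====

theorem pvContainsIff {s : PySem.Set String} {x : String} :
    PySem.Set.contains s x = true ↔ x ∈ s := by
  simp [PySem.Set.contains]

-- The "kept items" of A's loop, as a function of the current seen set.
def pvG (s : PySem.Set String) (items : List (List (String × String))) : List (List (String × String)) :=
  match items with
  | [] => []
  | h :: t =>
      if PySem.Set.contains s (pvChunkOf h) then pvG s t
      else h :: pvG (PySem.Set.add s (pvChunkOf h)) t

theorem foldl_eq_pvG (items : List (List (String × String)))
    (s : PySem.Set String) (acc : List (List (String × String))) :
    (items.foldl
      (fun (st : PySem.Set String × List (List (String × String))) item =>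
        let text := pvChunkOf item
        if PySem.Set.contains st.1 text then st
        else (PySem.Set.add st.1 text, st.2 ++ [item]))
      (s, acc)).2 = acc ++ pvG s items := by
  induction items generalizing s acc with
  | nil => simp [pvG]
  | cons h t ih =>
    simp only [List.foldl_cons, pvG]
    by_cases hc : PySem.Set.contains s (pvChunkOf h) = true
    · simp only [hc, if_true]; exact ih s acc
    · simp only [hc, Bool.false_eq_true, if_false]
      rw [ih]; simp

-- pvG depends on the seen set only through membership.
theorem pvG_congr (items : List (List (String × String)))
    (s s' : PySem.Set String) (h : ∀ x, x ∈ s ↔ x ∈ s') :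
    pvG s items = pvG s' items := by
  induction items generalizing s s' with
  | nil => rfl
  | cons a t ih =>
    have hc : PySem.Set.contains s (pvChunkOf a) = PySem.Set.contains s' (pvChunkOf a) := by
      by_cases hm : pvChunkOf a ∈ s
      · rw [pvContainsIff.mpr hm, pvContainsIff.mpr ((h _).mp hm)]
      · have hm' : pvChunkOf a ∉ s' := fun q => hm ((h _).mpr q)
        rw [Bool.eq_false_iff.mpr (fun q => hm (pvContainsIff.mp q)),
            Bool.eq_false_iff.mpr (fun q => hm' (pvContainsIff.mp q))]
    simp only [pvG, hc]
    by_cases hb : PySem.Set.contains s' (pvChunkOf a) = true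
    · simp only [hb, if_true]; exact ih s s' h
    · simp only [hb, Bool.false_eq_true, if_false]
      refine congrArg _ (ih _ _ ?_)
      intro x
      simp only [PySem.Set.mem_add]
      exact or_congr (h x) Iff.rfl

-- Adding c to the seen set is the same as filtering all c-chunked items out.
theorem pvG_add_eq_filter (items : List (List (String × String)))
    (s : PySem.Set String) (c : String) :
    pvG (PySem.Set.add s c) items
      = pvG s (items.filter (fun x => pvChunkOf x ≠ c)) := by
  induction items generalizing s with
  | nil => rfl
  | cons a t ih =>
    by_cases he : pvChunkOf a = c
    · subst he
      have hc : PySem.Set.contains (PySem.Set.add s (pvChunkOf a)) (pvChunkOf a) = true :=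
        pvContainsIff.mpr ((PySem.Set.mem_add _ _ _).mpr (Or.inr rfl))
      simp only [pvG, hc, if_true]
      simpa [List.filter_cons] using ih s
    · have hf : (a :: t).filter (fun x => pvChunkOf x ≠ c)
          = a :: t.filter (fun x => pvChunkOf x ≠ c) := by
        simp [he]
      rw [hf]
      by_cases hm : pvChunkOf a ∈ s
      · have h1 : PySem.Set.contains (PySem.Set.add s c) (pvChunkOf a) = true :=
          pvContainsIff.mpr ((PySem.Set.mem_add _ _ _).mpr (Or.inl hm))
        have h2 : PySem.Set.contains s (pvChunkOf a) = true := pvContainsIff.mpr hm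
        simp only [pvG, h1, h2, if_true]
        exact ih s
      · have h1 : PySem.Set.contains (PySem.Set.add s c) (pvChunkOf a) = false :=
          Bool.eq_false_iff.mpr (fun q => by
            rcases (PySem.Set.mem_add _ _ _).mp (pvContainsIff.mp q) with q | q
            · exact hm q
            · exact he q)
        have h2 : PySem.Set.contains s (pvChunkOf a) = false :=
          Bool.eq_false_iff.mpr (fun q => hm (pvContainsIff.mp q))
        simp only [pvG, h1, h2, Bool.false_eq_true, if_false]
        refine congrArg _ ?_
        rw [pvG_congr _ (PySem.Set.add (PySem.Set.add s c) (pvChunkOf a))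
              (PySem.Set.add (PySem.Set.add s (pvChunkOf a)) c)
              (fun x => by simp only [PySem.Set.mem_add]; tauto)]
        exact ih (PySem.Set.add s (pvChunkOf a))

theorem pvG_empty_eq_alt (n : Nat) (items : List (List (String × String)))
    (hn : items.length ≤ n) :
    pvG PySem.Set.empty items = deduplicate_by_text_alt items := by
  induction n generalizing items with
  | zero =>
    cases items with
    | nil => rw [deduplicate_by_text_alt.eq_def]; rfl
    | cons a t => simp at hn
  | succ n ih =>
    cases items with
    | nil => rw [deduplicate_by_text_alt.eq_def]; rfl
    | cons a t =>
      have hc : PySem.Set.contains (PySem.Set.empty : PySem.Set String) (pvChunkOf a) = false := rfl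
      rw [deduplicate_by_text_alt.eq_def]
      simp only [pvG, hc, Bool.false_eq_true, if_false]
      refine congrArg _ ?_
      have he : (PySem.Set.add (PySem.Set.empty : PySem.Set String) (pvChunkOf a)) =
          PySem.Set.add PySem.Set.empty (pvChunkOf a) := rfl
      rw [pvG_add_eq_filter t PySem.Set.empty (pvChunkOf a)]
      have hlen := List.length_filter_le (fun x => decide (pvChunkOf x ≠ pvChunkOf a)) t
      have : (t.filter (fun x => pvChunkOf x ≠ pvChunkOf a)).length ≤ n := by
        simp only [List.length_cons] at hn; omega
      exact ih _ this

-- ===== VERDICT (by name: the statement is the Claim_ definition above) =====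
theorem deduplicate_by_text_spec : Claim_equal_deduplicate_by_text := by
  intro items _ _
  unfold Spec_deduplicate_by_text deduplicate_by_text
  rw [foldl_eq_pvG items PySem.Set.empty []]
  simpa using pvG_empty_eq_alt items.length items le_rfl
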